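-- pv_equiv track=rewrite | github.com/ashish-kmr/vmsr | env/mp_env.py | search_actions
-- ===== SOURCE A (Python) =====
-- def search_actions(num_rots):
--   action_list=[[3]]
--   append_list_pos=[]
--   append_list_neg=[]
--   for i in range(num_rots):
--     append_list_pos.append(1)
--     append_list_neg.append(2)
--     action_list.append(append_list_pos[:]+[3])
--     action_list.append(append_list_neg[:]+[3])
--
--   return action_list
-- ===== SOURCE B (Python) =====
-- def search_actions(num_rots):
--   # The output has exactly 2*max(num_rots,0)+1 rows, and row k is determined
--   # by its index alone: k (k+1)//2 repetitions of 1 (k odd) or 2 (k even, k>0),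
--   # followed by the terminator 3. Build each row from its position directly.
--   def row(k):
--     return [1 if k % 2 == 1 else 2] * ((k + 1) // 2) + [3]
--   return [row(k) for k in range(2 * max(num_rots, 0) + 1)]
-- ===== Notes on version B (the rewrite author's own statement) =====
-- stated objective: alternative
-- what changed: Instead of iterating num_rots times threading two growing accumulator lists and emitting pos/neg pairs per iteration, B enumerates the 2*max(num_rots,0)+1 output positions and constructs each row in closed form from its index k: value 1 for odd k, 2 for even k, repeated (k+1)//2 times, plus the terminator 3.
import Mathlib
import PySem

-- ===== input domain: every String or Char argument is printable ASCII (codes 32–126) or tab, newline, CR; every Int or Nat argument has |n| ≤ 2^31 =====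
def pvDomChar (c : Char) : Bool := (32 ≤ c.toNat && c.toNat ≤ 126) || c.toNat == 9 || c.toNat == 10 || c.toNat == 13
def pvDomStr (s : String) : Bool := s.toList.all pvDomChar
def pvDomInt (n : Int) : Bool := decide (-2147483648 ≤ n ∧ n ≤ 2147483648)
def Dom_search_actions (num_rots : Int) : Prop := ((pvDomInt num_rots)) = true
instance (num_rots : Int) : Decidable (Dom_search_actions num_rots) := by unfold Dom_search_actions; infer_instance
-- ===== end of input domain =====

-- B drops A's pair-emitting loop with two threaded accumulators and instead maps a
-- closed-form row constructor over the 2*max(n,0)+1 output indices (objective: alternative).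

-- ===== PORT A =====
-- the loop body of A: state = (action_list, append_list_pos, append_list_neg)
def searchActionsStep (st : List (List Int) × List Int × List Int) (_i : Int) :
    List (List Int) × List Int × List Int :=
  let pos := st.2.1 ++ [1]
  let neg := st.2.2 ++ [2]
  ((st.1 ++ [pos ++ [3]]) ++ [neg ++ [3]], pos, neg)

def search_actions (num_rots : Int) : List (List Int) :=
  ((PySem.List.pyRange 0 num_rots 1).foldl searchActionsStep ([[3]], [], [])).1

-- ===== PORT B =====
-- row(k) of Source B: [1 if k % 2 == 1 else 2] * ((k + 1) // 2) + [3]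
def saRow (k : Int) : List Int :=
  List.replicate (PySem.Int.floordiv (k + 1) 2).toNat
    (if PySem.Int.mod k 2 = 1 then (1 : Int) else 2) ++ [3]

def search_actions_alt (num_rots : Int) : List (List Int) :=
  (PySem.List.pyRange 0 (2 * max num_rots 0 + 1) 1).map saRow

-- ===== PRECONDITION & SPEC =====
def Spec_search_actions (num_rots : Int) (out : List (List Int)) : Prop := out = search_actions_alt num_rots
instance (num_rots : Int) (out : List (List Int)) : Decidable (Spec_search_actions num_rots out) := by unfold Spec_search_actions; infer_instance

-- ===== CLAIM (what is proved, stated in full; the proofs are below) =====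
def Claim_equal_search_actions : Prop := ∀ (num_rots : Int), Dom_search_actions num_rots → Spec_search_actions num_rots (search_actions num_rots)

-- ===== LEMMAS AND PROOFS =====
-- loop invariant for A: after k iterations the state is fully determined by k
theorem searchActions_fold (k : Nat) :
    (PySem.List.pyRange 0 (k : Int) 1).foldl searchActionsStep ([[3]], [], []) =
      ([[3]] ++ (PySem.List.pyRange 0 (k : Int) 1).flatMap
          (fun i => [List.replicate (i + 1).toNat 1 ++ [3], List.replicate (i + 1).toNat 2 ++ [3]]),
       List.replicate k 1, List.replicate k 2) := by
  induction k with
  | zero => simp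
  | succ k ih =>
    have h : PySem.List.pyRange 0 ((k + 1 : Nat) : Int) 1 =
        PySem.List.pyRange 0 (k : Int) 1 ++ [(k : Int)] := by
      push_cast
      exact PySem.List.pyRange_one_succ_right (by positivity)
    rw [h, List.foldl_append, ih]
    simp [searchActionsStep, List.replicate_succ', List.flatMap_append]

-- B's row at an odd index 2k+1 is the pos row of A's (k+1)-st iteration
theorem saRow_odd (k : Nat) : saRow (2 * (k : Int) + 1) = List.replicate (k + 1) 1 ++ [3] := by
  unfold saRow
  have h1 : PySem.Int.mod (2 * (k : Int) + 1) 2 = 1 := by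
    rw [PySem.Int.mod_eq_emod_of_pos (by norm_num)]; omega
  have h2 : PySem.Int.floordiv (2 * (k : Int) + 1 + 1) 2 = (k : Int) + 1 := by
    rw [PySem.Int.floordiv_eq_ediv_of_pos (by norm_num)]; omega
  rw [h1, h2]
  simp

-- B's row at a positive even index 2k+2 is the neg row of A's (k+1)-st iteration
theorem saRow_even (k : Nat) : saRow (2 * (k : Int) + 2) = List.replicate (k + 1) 2 ++ [3] := by
  unfold saRow
  have h1 : PySem.Int.mod (2 * (k : Int) + 2) 2 = 0 := by
    rw [PySem.Int.mod_eq_emod_of_pos (by norm_num)]; omega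
  have h2 : PySem.Int.floordiv (2 * (k : Int) + 2 + 1) 2 = (k : Int) + 1 := by
    rw [PySem.Int.floordiv_eq_ediv_of_pos (by norm_num)]; omega
  rw [h1, h2]
  simp

-- B's map over all 2k+1 indices equals A's header-plus-pairs shape
theorem saRow_map (k : Nat) :
    (PySem.List.pyRange 0 (2 * (k : Int) + 1) 1).map saRow =
      [[3]] ++ (PySem.List.pyRange 0 (k : Int) 1).flatMap
        (fun i => [List.replicate (i + 1).toNat 1 ++ [3], List.replicate (i + 1).toNat 2 ++ [3]]) := by
  induction k with
  | zero =>
    rw [show (2 * ((0 : Nat) : Int) + 1) = 0 + 1 by norm_num, PySem.List.pyRange_one_singleton]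
    simp [saRow, PySem.Int.mod, PySem.Int.floordiv]
  | succ k ih =>
    have h1 : PySem.List.pyRange 0 (2 * ((k + 1 : Nat) : Int) + 1) 1 =
        PySem.List.pyRange 0 (2 * (k : Int) + 1) 1 ++ [2 * (k : Int) + 1] ++ [2 * (k : Int) + 2] := by
      push_cast
      rw [show (2 * ((k : Int) + 1) + 1) = (2 * (k : Int) + 2) + 1 by ring,
          PySem.List.pyRange_one_succ_right (by positivity),
          show (2 * (k : Int) + 2) = (2 * (k : Int) + 1) + 1 by ring,
          PySem.List.pyRange_one_succ_right (by positivity)]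
    have h2 : PySem.List.pyRange 0 ((k + 1 : Nat) : Int) 1 =
        PySem.List.pyRange 0 (k : Int) 1 ++ [(k : Int)] := by
      push_cast
      exact PySem.List.pyRange_one_succ_right (by positivity)
    rw [h1, h2]
    simp only [List.map_append, ih, List.flatMap_append]
    simp [saRow_odd, saRow_even]

-- ===== VERDICT (by name: the statement is the Claim_ definition above) =====
theorem search_actions_spec : Claim_equal_search_actions := by
  intro n _
  unfold Spec_search_actions search_actions search_actions_alt
  by_cases h : n ≤ 0
  · rw [PySem.List.pyRange_one_eq_nil h,
        show (2 * max n 0 + 1) = 0 + 1 by omega, PySem.List.pyRange_one_singleton]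
    simp [saRow, PySem.Int.mod, PySem.Int.floordiv]
  · obtain ⟨k, rfl⟩ : ∃ k : Nat, n = (k : Int) := ⟨n.toNat, by omega⟩
    rw [show max (k : Int) 0 = (k : Int) by omega, searchActions_fold, saRow_map]
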